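-- pv_equiv track=rewrite | github.com/chunkhound/chunkhound | chunkhound/snapshot/chunk_systems_tui.py | _area_bucket
-- ===== SOURCE A (Python) =====
-- def _normalize_path(path: str) -> str:
--     return str(path or "").replace("\\", "/").lstrip("./")
--
-- def _area_bucket(path: str) -> str:
--     p = _normalize_path(path)
--     if not p:
--         return "other"
--
--     prefixes: list[tuple[str, str]] = [
--         ("chunkhound/api/cli/", "chunkhound/api/cli"),
--         ("chunkhound/snapshot/", "chunkhound/snapshot"),
--         ("chunkhound/parsers/", "chunkhound/parsers"),
--         ("chunkhound/providers/", "chunkhound/providers"),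
--         ("chunkhound/services/research/", "chunkhound/services/research"),
--         ("chunkhound/services/", "chunkhound/services"),
--         ("chunkhound/core/", "chunkhound/core"),
--         ("tests/", "tests"),
--         ("scripts/", "scripts"),
--         ("operations/", "operations"),
--     ]
--     for prefix, bucket in prefixes:
--         if p == bucket or p.startswith(prefix):
--             return bucket
--     return "other"
-- ===== SOURCE B (Python) =====
-- def _normalize_path(path: str) -> str:
--     return str(path or "").replace("\\", "/").lstrip("./")
--
-- _BUCKETS = frozenset([
--     "chunkhound/api/cli",
--     "chunkhound/snapshot",
--     "chunkhound/parsers",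
--     "chunkhound/providers",
--     "chunkhound/services/research",
--     "chunkhound/services",
--     "chunkhound/core",
--     "tests",
--     "scripts",
--     "operations",
-- ])
--
-- def _area_bucket(path: str) -> str:
--     p = _normalize_path(path)
--     if not p:
--         return "other"
--     parts = p.split("/")
--     for k in range(len(parts), 0, -1):
--         cand = "/".join(parts[:k])
--         if cand in _BUCKETS:
--             return cand
--     return "other"
-- ===== Notes on version B (the rewrite author's own statement) =====
-- stated objective: alternative
-- what changed: Replaces A's ordered linear scan over ten (prefix, bucket) pairs with string equality/startswith tests by a longest-directory-prefix lookup: split the normalized path at directory separators and probe the join of the first k segments, k descending, against a frozenset of bucket names.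
import Mathlib
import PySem

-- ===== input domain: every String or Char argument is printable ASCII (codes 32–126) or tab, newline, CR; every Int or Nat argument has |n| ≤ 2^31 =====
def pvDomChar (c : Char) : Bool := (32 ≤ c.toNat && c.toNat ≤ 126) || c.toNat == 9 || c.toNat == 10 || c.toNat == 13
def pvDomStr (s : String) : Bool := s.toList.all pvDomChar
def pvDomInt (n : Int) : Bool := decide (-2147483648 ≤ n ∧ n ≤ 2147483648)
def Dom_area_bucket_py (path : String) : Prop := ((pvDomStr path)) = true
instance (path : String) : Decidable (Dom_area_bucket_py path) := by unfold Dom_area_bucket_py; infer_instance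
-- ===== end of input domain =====

-- B replaces A's ordered linear scan over (prefix, bucket) pairs by a longest-directory-prefix
-- lookup: split the path on '/' and probe the joined first-k segments, k descending, against a
-- set of bucket names (objective: alternative decomposition, same cost on these tiny inputs).

-- ===== PORT A =====
-- shared helper `_normalize_path` (textually identical in both Python sources):
-- `str(path or "")` is the identity on a str argument; `.replace("\\", "/")` is
-- PySem.Chars.replace; `.lstrip("./")` is ported by hand as dropWhile of chars in {'.', '/'},
-- which is exact: str.lstrip(chars) removes leading characters that are members of chars.
def pvNorm (path : String) : List Char :=
  (PySem.Chars.replace path.toList ['\\'] ['/']).dropWhile (fun c => c == '.' || c == '/')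

def pvPrefixesA : List (List Char × List Char) :=
  [("chunkhound/api/cli/".toList, "chunkhound/api/cli".toList),
   ("chunkhound/snapshot/".toList, "chunkhound/snapshot".toList),
   ("chunkhound/parsers/".toList, "chunkhound/parsers".toList),
   ("chunkhound/providers/".toList, "chunkhound/providers".toList),
   ("chunkhound/services/research/".toList, "chunkhound/services/research".toList),
   ("chunkhound/services/".toList, "chunkhound/services".toList),
   ("chunkhound/core/".toList, "chunkhound/core".toList),
   ("tests/".toList, "tests".toList),
   ("scripts/".toList, "scripts".toList),
   ("operations/".toList, "operations".toList)]

-- the `for prefix, bucket in prefixes:` loop with its early return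
def pvScanA (p : List Char) : List (List Char × List Char) → String
  | [] => "other"
  | (pre, b) :: rest =>
      if p == b || PySem.Chars.startswith p pre then String.ofList b else pvScanA p rest

def area_bucket_py (path : String) : String :=
  let p := pvNorm path
  if p = [] then "other" else pvScanA p pvPrefixesA

-- ===== PORT B =====
def pvBuckets : PySem.Set (List Char) :=
  PySem.Set.ofList
    ["chunkhound/api/cli".toList, "chunkhound/snapshot".toList, "chunkhound/parsers".toList,
     "chunkhound/providers".toList, "chunkhound/services/research".toList,
     "chunkhound/services".toList, "chunkhound/core".toList, "tests".toList,
     "scripts".toList, "operations".toList]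

-- the `for k in range(len(parts), 0, -1):` loop with its early return (k = m, m-1, …, 1)
def pvScanB (parts : List (List Char)) : Nat → Option (List Char)
  | 0 => none
  | Nat.succ k =>
      let cand := PySem.Chars.join ['/'] (parts.take (k + 1))
      if pvBuckets.contains cand then some cand else pvScanB parts k

def area_bucket_py_alt (path : String) : String :=
  let p := pvNorm path
  if p = [] then "other"
  else
    let parts := PySem.Chars.splitOn p ['/']
    match pvScanB parts parts.length with
    | some cand => String.ofList cand
    | none => "other"

-- ===== PRECONDITION & SPEC =====
def Spec_area_bucket_py (path : String) (out : String) : Prop := out = area_bucket_py_alt path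
instance (path : String) (out : String) : Decidable (Spec_area_bucket_py path out) := by unfold Spec_area_bucket_py; infer_instance

-- ===== CLAIM (what is proved, stated in full; the proofs are below) =====
def Claim_equal_area_bucket_py : Prop := ∀ (path : String), Dom_area_bucket_py path → Spec_area_bucket_py path (area_bucket_py path)

-- ===== LEMMAS AND PROOFS =====

-- the ten bucket names, in A's scan order
def pvList10 : List (List Char) :=
  ["chunkhound/api/cli".toList, "chunkhound/snapshot".toList, "chunkhound/parsers".toList,
   "chunkhound/providers".toList, "chunkhound/services/research".toList,
   "chunkhound/services".toList, "chunkhound/core".toList, "tests".toList,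
   "scripts".toList, "operations".toList]

-- "p matches bucket b": A's per-row condition, with the row's prefix written as b ++ ['/']
def pvP (p b : List Char) : Prop := p = b ∨ (b ++ ['/']) <+: p

theorem pvModifyHead_id (l : List (List Char)) : List.modifyHead (fun x => x) l = l := by
  cases l <;> simp

-- PySem.Chars.splitOn on the one-character separator '/' is Mathlib's List.splitOn
theorem pvGo_eq (fuel : Nat) : ∀ (l cur : List Char) (acc : List (List Char)), l.length < fuel →
    PySem.Chars.splitOn.go ['/'] fuel l cur acc
      = acc.reverse ++ (List.splitOn '/' l).modifyHead (cur.reverse ++ ·) := by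
  induction fuel with
  | zero => intro l cur acc h; omega
  | succ f ih =>
    intro l cur acc h
    cases l with
    | nil =>
      simp [PySem.Chars.splitOn.go, List.splitOn, List.splitOnP_nil]
    | cons c rest =>
      by_cases hc : c = '/'
      · subst hc
        rw [PySem.Chars.splitOn.go]
        simp only [List.isPrefixOf, BEq.rfl, Bool.true_and, if_pos]
        rw [ih _ _ _ (by simpa using Nat.lt_of_succ_lt_succ h)]
        simp only [List.splitOn, List.splitOnP_cons, BEq.rfl, if_pos]
        simp [pvModifyHead_id]
      · rw [PySem.Chars.splitOn.go]
        have : (['/'].isPrefixOf (c :: rest)) = false := by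
          simp [List.isPrefixOf]; exact fun e => (hc e.symm).elim
        simp only [this, if_neg Bool.false_ne_true]
        rw [ih _ _ _ (by simpa using Nat.lt_of_succ_lt_succ h)]
        simp only [List.splitOn, List.splitOnP_cons]
        have hne : (c == '/') = false := by simp [hc]
        rw [hne]
        simp only [if_neg Bool.false_ne_true]
        obtain ⟨a, t, ht⟩ : ∃ a t, List.splitOnP (fun x => x == '/') rest = a :: t := by
          cases hsp : List.splitOnP (fun x => x == '/') rest with
          | nil => exact absurd hsp (List.splitOnP_ne_nil _ _)
          | cons a t => exact ⟨a, t, rfl⟩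
        rw [ht]
        simp

theorem pvSplitOn_eq (cs : List Char) : PySem.Chars.splitOn cs ['/'] = cs.splitOn '/' := by
  rw [PySem.Chars.splitOn, pvGo_eq _ _ _ _ (by omega)]
  simp only [List.reverse_nil, List.nil_append]
  exact pvModifyHead_id _

theorem pvSplit_ne_nil (cs : List Char) : cs.splitOn '/' ≠ [] := by
  simp [List.splitOn]; exact List.splitOnP_ne_nil _ _

theorem pvInter_append (l₁ l₂ : List (List Char)) (h₁ : l₁ ≠ []) (h₂ : l₂ ≠ []) :
    PySem.Chars.join ['/'] (l₁ ++ l₂)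
      = PySem.Chars.join ['/'] l₁ ++ '/' :: PySem.Chars.join ['/'] l₂ := by
  induction l₁ with
  | nil => exact absurd rfl h₁
  | cons a t ih =>
    cases t with
    | nil =>
      obtain ⟨b, u, rfl⟩ : ∃ b u, l₂ = b :: u := by
        cases l₂ with | nil => exact absurd rfl h₂ | cons b u => exact ⟨b, u, rfl⟩
      rw [List.singleton_append, PySem.Chars.join_cons_cons, PySem.Chars.join_singleton]
      simp
    | cons a' t' =>
      have h3 : (a :: a' :: t') ++ l₂ = a :: ((a' :: t') ++ l₂) := by simp
      rw [h3, List.cons_append, PySem.Chars.join_cons_cons, ← List.cons_append,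
          ih (by simp), PySem.Chars.join_cons_cons]
      simp

theorem pvJoin_splitOn (p : List Char) : PySem.Chars.join ['/'] (p.splitOn '/') = p := by
  rw [PySem.Chars.join, List.intercalate_splitOn]

theorem pvSplit_append (xs ys : List Char) :
    (xs ++ '/' :: ys).splitOn '/' = xs.splitOn '/' ++ ys.splitOn '/' := by
  induction xs with
  | nil => simp [List.splitOn, List.splitOnP_cons, List.splitOnP_nil]
  | cons c xs ih =>
    simp only [List.cons_append, List.splitOn, List.splitOnP_cons] at *
    by_cases hc : (c == '/') = true
    · rw [hc]; simp only [if_pos]; rw [ih]; simp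
    · rw [Bool.not_eq_true] at hc
      rw [hc] at *
      simp only [if_neg Bool.false_ne_true] at *
      rw [ih]
      obtain ⟨a, t, ht⟩ : ∃ a t, List.splitOnP (fun x => x == '/') xs = a :: t := by
        cases hsp : List.splitOnP (fun x => x == '/') xs with
        | nil => exact absurd hsp (List.splitOnP_ne_nil _ _)
        | cons a t => exact ⟨a, t, rfl⟩
      rw [ht]
      simp

theorem pvCand_prefix (p : List Char) (k : Nat) (h1 : 1 ≤ k) (h2 : k < (p.splitOn '/').length) :
    PySem.Chars.join ['/'] ((p.splitOn '/').take k) ++ ['/'] <+: p := by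
  have hsplit : (p.splitOn '/').take k ++ (p.splitOn '/').drop k = p.splitOn '/' :=
    List.take_append_drop _ _
  have htn : ((p.splitOn '/').take k) ≠ [] := by
    intro h; rw [List.take_eq_nil_iff] at h
    rcases h with h | h
    · omega
    · rw [h] at h2; simp at h2
  have hdn : ((p.splitOn '/').drop k) ≠ [] := by
    intro h; rw [List.drop_eq_nil_iff] at h; omega
  refine ⟨PySem.Chars.join ['/'] ((p.splitOn '/').drop k), ?_⟩
  have := pvInter_append _ _ htn hdn
  rw [hsplit, pvJoin_splitOn] at this
  rw [List.append_assoc, List.singleton_append, ← this]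

theorem pvCand_mono (parts : List (List Char)) (k₀ k : Nat)
    (h1 : 1 ≤ k₀) (h : k₀ < k) (hk : k ≤ parts.length) :
    PySem.Chars.join ['/'] (parts.take k₀) ++ ['/'] <+: PySem.Chars.join ['/'] (parts.take k) := by
  have hdecomp : parts.take k = parts.take k₀ ++ (parts.drop k₀).take (k - k₀) := by
    rw [← List.take_add]; congr 1; omega
  have htn : parts.take k₀ ≠ [] := by
    intro hh; rw [List.take_eq_nil_iff] at hh
    rcases hh with hh | hh
    · omega
    · rw [hh] at hk; simp at hk; omega
  have hdn : (parts.drop k₀).take (k - k₀) ≠ [] := by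
    intro hh; rw [List.take_eq_nil_iff] at hh
    rcases hh with hh | hh
    · omega
    · rw [List.drop_eq_nil_iff] at hh; omega
  rw [hdecomp, pvInter_append _ _ htn hdn]
  refine ⟨PySem.Chars.join ['/'] ((parts.drop k₀).take (k - k₀)), ?_⟩
  simp

theorem pvExists_cand (p b r : List Char) (h : b ++ '/' :: r = p) :
    ∃ k, 1 ≤ k ∧ k < (p.splitOn '/').length
      ∧ PySem.Chars.join ['/'] ((p.splitOn '/').take k) = b := by
  refine ⟨(b.splitOn '/').length, ?_, ?_, ?_⟩
  · have := pvSplit_ne_nil b; cases hh : b.splitOn '/' with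
    | nil => exact absurd hh this
    | cons a t => simp
  · rw [← h, pvSplit_append]
    have := pvSplit_ne_nil r
    cases hh : r.splitOn '/' with
    | nil => exact absurd hh this
    | cons a t => simp
  · rw [← h, pvSplit_append, List.take_left, pvJoin_splitOn]

theorem pvP_of_cand (p : List Char) (j : Nat) (h1 : 1 ≤ j) (h2 : j ≤ (p.splitOn '/').length)
    (b : List Char) (hb : PySem.Chars.join ['/'] ((p.splitOn '/').take j) = b) :
    pvP p b := by
  subst hb
  rcases Nat.lt_or_ge j (p.splitOn '/').length with hlt | hge
  · exact Or.inr (pvCand_prefix p j h1 hlt)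
  · left
    have hj : j = (p.splitOn '/').length := by omega
    rw [hj, List.take_length, pvJoin_splitOn]

theorem pvCand_of_P (p b : List Char) (hb : pvP p b) :
    ∃ k, 1 ≤ k ∧ k ≤ (p.splitOn '/').length
      ∧ PySem.Chars.join ['/'] ((p.splitOn '/').take k) = b := by
  rcases hb with rfl | ⟨t, ht⟩
  · refine ⟨(p.splitOn '/').length, ?_, le_refl _, ?_⟩
    · have := pvSplit_ne_nil p
      cases hh : p.splitOn '/' with
      | nil => exact absurd hh this
      | cons a u => simp
    · rw [List.take_length, pvJoin_splitOn]
  · have ht' : b ++ '/' :: t = p := by rw [← ht]; simp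
    obtain ⟨k, h1, h2, h3⟩ := pvExists_cand p b t ht'
    exact ⟨k, h1, le_of_lt h2, h3⟩

theorem pvMemBuckets (x : List Char) : x ∈ pvBuckets ↔ x ∈ pvList10 :=
  PySem.Set.mem_ofList _ _

theorem pvScanB_none (parts : List (List Char)) (m : Nat)
    (h : ∀ j, 1 ≤ j → j ≤ m → PySem.Chars.join ['/'] (parts.take j) ∉ pvBuckets) :
    pvScanB parts m = none := by
  induction m with
  | zero => rfl
  | succ k ih =>
    rw [pvScanB]
    have hc : pvBuckets.contains (PySem.Chars.join ['/'] (parts.take (k+1))) = false := by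
      rw [← Bool.not_eq_true, PySem.Set.contains_iff]
      exact h (k+1) (by omega) (le_refl _)
    simp only [hc, if_neg Bool.false_ne_true]
    exact ih fun j h1 h2 => h j h1 (by omega)

theorem pvScanB_hit (parts : List (List Char)) (m k₀ : Nat)
    (h1 : 1 ≤ k₀) (h2 : k₀ ≤ m)
    (hin : PySem.Chars.join ['/'] (parts.take k₀) ∈ pvBuckets)
    (habove : ∀ j, k₀ < j → j ≤ m → PySem.Chars.join ['/'] (parts.take j) ∉ pvBuckets) :
    pvScanB parts m = some (PySem.Chars.join ['/'] (parts.take k₀)) := by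
  induction m with
  | zero => omega
  | succ k ih =>
    rw [pvScanB]
    by_cases he : k₀ = k + 1
    · subst he
      have hc : pvBuckets.contains (PySem.Chars.join ['/'] (parts.take (k+1))) = true := by
        rw [PySem.Set.contains_iff]; exact hin
      simp only [hc, if_true]
    · have hc : pvBuckets.contains (PySem.Chars.join ['/'] (parts.take (k+1))) = false := by
        rw [← Bool.not_eq_true, PySem.Set.contains_iff]
        exact habove (k+1) (by omega) (le_refl _)
      simp only [hc, if_neg Bool.false_ne_true]
      exact ih (by omega) fun j hj1 hj2 => habove j hj1 (by omega)

-- A's row condition as a proposition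
theorem pvCond_iff (p b pre : List Char) (hpre : pre = b ++ ['/']) :
    (p == b || PySem.Chars.startswith p pre) = true ↔ pvP p b := by
  subst hpre
  simp [pvP, Bool.or_eq_true, PySem.Chars.startswith_iff]

-- B's result when b matches and no strictly longer bucket matches
theorem pvKey (p b : List Char) (hb : b ∈ pvList10) (hPb : pvP p b)
    (hmax : ∀ b', b' ∈ pvList10 → (b ++ ['/']) <+: b' → ¬ pvP p b') :
    (match pvScanB (p.splitOn '/') (p.splitOn '/').length with
     | some cand => String.ofList cand
     | none => "other") = String.ofList b := by
  obtain ⟨k₀, hk1, hk2, hk3⟩ := pvCand_of_P p b hPb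
  have habove : ∀ j, k₀ < j → j ≤ (p.splitOn '/').length →
      PySem.Chars.join ['/'] ((p.splitOn '/').take j) ∉ pvBuckets := by
    intro j hj1 hj2 hmem
    have hc10 := (pvMemBuckets _).mp hmem
    have hP := pvP_of_cand p j (by omega) hj2 _ rfl
    have hpref : b ++ ['/'] <+: PySem.Chars.join ['/'] ((p.splitOn '/').take j) := by
      rw [← hk3]; exact pvCand_mono _ k₀ j hk1 hj1 hj2
    exact hmax _ hc10 hpref hP
  have hin : PySem.Chars.join ['/'] ((p.splitOn '/').take k₀) ∈ pvBuckets := by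
    rw [hk3]; exact (pvMemBuckets b).mpr hb
  rw [pvScanB_hit _ _ k₀ hk1 hk2 hin habove, hk3]

theorem pvKeyNone (p : List Char) (hall : ∀ b, b ∈ pvList10 → ¬ pvP p b) :
    (match pvScanB (p.splitOn '/') (p.splitOn '/').length with
     | some cand => String.ofList cand
     | none => "other") = "other" := by
  have h : ∀ j, 1 ≤ j → j ≤ (p.splitOn '/').length →
      PySem.Chars.join ['/'] ((p.splitOn '/').take j) ∉ pvBuckets := by
    intro j h1 h2 hmem
    exact hall _ ((pvMemBuckets _).mp hmem) (pvP_of_cand p j h1 h2 _ rfl)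
  rw [pvScanB_none _ _ h]

-- ===== VERDICT (by name: the statement is the Claim_ definition above) =====
theorem area_bucket_py_spec : Claim_equal_area_bucket_py := by
  intro path _
  unfold Spec_area_bucket_py area_bucket_py area_bucket_py_alt
  set p := pvNorm path with hpdef
  by_cases hp : p = []
  · simp [hp]
  · simp only [if_neg hp]
    rw [pvSplitOn_eq]
    by_cases h1 : pvP p "chunkhound/api/cli".toList
    ·
      have c1 : (p == "chunkhound/api/cli".toList || PySem.Chars.startswith p "chunkhound/api/cli/".toList) = true := by
        rw [pvCond_iff p _ _ (by decide)]; exact h1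
      simp only [pvScanA, pvPrefixesA, c1, if_true]
      refine (pvKey p "chunkhound/api/cli".toList (by decide) h1 ?_).symm
      · intro b' hb' hpref
        exact absurd hpref (by
          have : ∀ x ∈ pvList10, ¬ (("chunkhound/api/cli".toList ++ ['/']) <+: x) := by decide
          exact this b' hb')
    by_cases h2 : pvP p "chunkhound/snapshot".toList
    ·
      have c1 : (p == "chunkhound/api/cli".toList || PySem.Chars.startswith p "chunkhound/api/cli/".toList) = false := by
        rw [← Bool.not_eq_true, pvCond_iff p _ _ (by decide)]; exact h1
      have c2 : (p == "chunkhound/snapshot".toList || PySem.Chars.startswith p "chunkhound/snapshot/".toList) = true := by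
        rw [pvCond_iff p _ _ (by decide)]; exact h2
      simp only [pvScanA, pvPrefixesA, c1, c2, Bool.false_eq_true, if_false, if_true]
      refine (pvKey p "chunkhound/snapshot".toList (by decide) h2 ?_).symm
      · intro b' hb' hpref
        exact absurd hpref (by
          have : ∀ x ∈ pvList10, ¬ (("chunkhound/snapshot".toList ++ ['/']) <+: x) := by decide
          exact this b' hb')
    by_cases h3 : pvP p "chunkhound/parsers".toList
    ·
      have c1 : (p == "chunkhound/api/cli".toList || PySem.Chars.startswith p "chunkhound/api/cli/".toList) = false := by
        rw [← Bool.not_eq_true, pvCond_iff p _ _ (by decide)]; exact h1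
      have c2 : (p == "chunkhound/snapshot".toList || PySem.Chars.startswith p "chunkhound/snapshot/".toList) = false := by
        rw [← Bool.not_eq_true, pvCond_iff p _ _ (by decide)]; exact h2
      have c3 : (p == "chunkhound/parsers".toList || PySem.Chars.startswith p "chunkhound/parsers/".toList) = true := by
        rw [pvCond_iff p _ _ (by decide)]; exact h3
      simp only [pvScanA, pvPrefixesA, c1, c2, c3, Bool.false_eq_true, if_false, if_true]
      refine (pvKey p "chunkhound/parsers".toList (by decide) h3 ?_).symm
      · intro b' hb' hpref
        exact absurd hpref (by
          have : ∀ x ∈ pvList10, ¬ (("chunkhound/parsers".toList ++ ['/']) <+: x) := by decide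
          exact this b' hb')
    by_cases h4 : pvP p "chunkhound/providers".toList
    ·
      have c1 : (p == "chunkhound/api/cli".toList || PySem.Chars.startswith p "chunkhound/api/cli/".toList) = false := by
        rw [← Bool.not_eq_true, pvCond_iff p _ _ (by decide)]; exact h1
      have c2 : (p == "chunkhound/snapshot".toList || PySem.Chars.startswith p "chunkhound/snapshot/".toList) = false := by
        rw [← Bool.not_eq_true, pvCond_iff p _ _ (by decide)]; exact h2
      have c3 : (p == "chunkhound/parsers".toList || PySem.Chars.startswith p "chunkhound/parsers/".toList) = false := by
        rw [← Bool.not_eq_true, pvCond_iff p _ _ (by decide)]; exact h3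
      have c4 : (p == "chunkhound/providers".toList || PySem.Chars.startswith p "chunkhound/providers/".toList) = true := by
        rw [pvCond_iff p _ _ (by decide)]; exact h4
      simp only [pvScanA, pvPrefixesA, c1, c2, c3, c4, Bool.false_eq_true, if_false, if_true]
      refine (pvKey p "chunkhound/providers".toList (by decide) h4 ?_).symm
      · intro b' hb' hpref
        exact absurd hpref (by
          have : ∀ x ∈ pvList10, ¬ (("chunkhound/providers".toList ++ ['/']) <+: x) := by decide
          exact this b' hb')
    by_cases h5 : pvP p "chunkhound/services/research".toList
    ·
      have c1 : (p == "chunkhound/api/cli".toList || PySem.Chars.startswith p "chunkhound/api/cli/".toList) = false := by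
        rw [← Bool.not_eq_true, pvCond_iff p _ _ (by decide)]; exact h1
      have c2 : (p == "chunkhound/snapshot".toList || PySem.Chars.startswith p "chunkhound/snapshot/".toList) = false := by
        rw [← Bool.not_eq_true, pvCond_iff p _ _ (by decide)]; exact h2
      have c3 : (p == "chunkhound/parsers".toList || PySem.Chars.startswith p "chunkhound/parsers/".toList) = false := by
        rw [← Bool.not_eq_true, pvCond_iff p _ _ (by decide)]; exact h3
      have c4 : (p == "chunkhound/providers".toList || PySem.Chars.startswith p "chunkhound/providers/".toList) = false := by
        rw [← Bool.not_eq_true, pvCond_iff p _ _ (by decide)]; exact h4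
      have c5 : (p == "chunkhound/services/research".toList || PySem.Chars.startswith p "chunkhound/services/research/".toList) = true := by
        rw [pvCond_iff p _ _ (by decide)]; exact h5
      simp only [pvScanA, pvPrefixesA, c1, c2, c3, c4, c5, Bool.false_eq_true, if_false, if_true]
      refine (pvKey p "chunkhound/services/research".toList (by decide) h5 ?_).symm
      · intro b' hb' hpref
        exact absurd hpref (by
          have : ∀ x ∈ pvList10, ¬ (("chunkhound/services/research".toList ++ ['/']) <+: x) := by decide
          exact this b' hb')
    by_cases h6 : pvP p "chunkhound/services".toList
    ·
      have c1 : (p == "chunkhound/api/cli".toList || PySem.Chars.startswith p "chunkhound/api/cli/".toList) = false := by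
        rw [← Bool.not_eq_true, pvCond_iff p _ _ (by decide)]; exact h1
      have c2 : (p == "chunkhound/snapshot".toList || PySem.Chars.startswith p "chunkhound/snapshot/".toList) = false := by
        rw [← Bool.not_eq_true, pvCond_iff p _ _ (by decide)]; exact h2
      have c3 : (p == "chunkhound/parsers".toList || PySem.Chars.startswith p "chunkhound/parsers/".toList) = false := by
        rw [← Bool.not_eq_true, pvCond_iff p _ _ (by decide)]; exact h3
      have c4 : (p == "chunkhound/providers".toList || PySem.Chars.startswith p "chunkhound/providers/".toList) = false := by
        rw [← Bool.not_eq_true, pvCond_iff p _ _ (by decide)]; exact h4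
      have c5 : (p == "chunkhound/services/research".toList || PySem.Chars.startswith p "chunkhound/services/research/".toList) = false := by
        rw [← Bool.not_eq_true, pvCond_iff p _ _ (by decide)]; exact h5
      have c6 : (p == "chunkhound/services".toList || PySem.Chars.startswith p "chunkhound/services/".toList) = true := by
        rw [pvCond_iff p _ _ (by decide)]; exact h6
      simp only [pvScanA, pvPrefixesA, c1, c2, c3, c4, c5, c6, Bool.false_eq_true, if_false, if_true]
      refine (pvKey p "chunkhound/services".toList (by decide) h6 ?_).symm
      · intro b' hb' hpref
        have honly : b' = "chunkhound/services/research".toList := by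
          revert hpref
          have : ∀ x ∈ pvList10, ("chunkhound/services".toList ++ ['/']) <+: x → x = "chunkhound/services/research".toList := by decide
          exact this b' hb'
        rw [honly]; exact h5
    by_cases h7 : pvP p "chunkhound/core".toList
    ·
      have c1 : (p == "chunkhound/api/cli".toList || PySem.Chars.startswith p "chunkhound/api/cli/".toList) = false := by
        rw [← Bool.not_eq_true, pvCond_iff p _ _ (by decide)]; exact h1
      have c2 : (p == "chunkhound/snapshot".toList || PySem.Chars.startswith p "chunkhound/snapshot/".toList) = false := by
        rw [← Bool.not_eq_true, pvCond_iff p _ _ (by decide)]; exact h2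
      have c3 : (p == "chunkhound/parsers".toList || PySem.Chars.startswith p "chunkhound/parsers/".toList) = false := by
        rw [← Bool.not_eq_true, pvCond_iff p _ _ (by decide)]; exact h3
      have c4 : (p == "chunkhound/providers".toList || PySem.Chars.startswith p "chunkhound/providers/".toList) = false := by
        rw [← Bool.not_eq_true, pvCond_iff p _ _ (by decide)]; exact h4
      have c5 : (p == "chunkhound/services/research".toList || PySem.Chars.startswith p "chunkhound/services/research/".toList) = false := by
        rw [← Bool.not_eq_true, pvCond_iff p _ _ (by decide)]; exact h5
      have c6 : (p == "chunkhound/services".toList || PySem.Chars.startswith p "chunkhound/services/".toList) = false := by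
        rw [← Bool.not_eq_true, pvCond_iff p _ _ (by decide)]; exact h6
      have c7 : (p == "chunkhound/core".toList || PySem.Chars.startswith p "chunkhound/core/".toList) = true := by
        rw [pvCond_iff p _ _ (by decide)]; exact h7
      simp only [pvScanA, pvPrefixesA, c1, c2, c3, c4, c5, c6, c7, Bool.false_eq_true, if_false, if_true]
      refine (pvKey p "chunkhound/core".toList (by decide) h7 ?_).symm
      · intro b' hb' hpref
        exact absurd hpref (by
          have : ∀ x ∈ pvList10, ¬ (("chunkhound/core".toList ++ ['/']) <+: x) := by decide
          exact this b' hb')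
    by_cases h8 : pvP p "tests".toList
    ·
      have c1 : (p == "chunkhound/api/cli".toList || PySem.Chars.startswith p "chunkhound/api/cli/".toList) = false := by
        rw [← Bool.not_eq_true, pvCond_iff p _ _ (by decide)]; exact h1
      have c2 : (p == "chunkhound/snapshot".toList || PySem.Chars.startswith p "chunkhound/snapshot/".toList) = false := by
        rw [← Bool.not_eq_true, pvCond_iff p _ _ (by decide)]; exact h2
      have c3 : (p == "chunkhound/parsers".toList || PySem.Chars.startswith p "chunkhound/parsers/".toList) = false := by
        rw [← Bool.not_eq_true, pvCond_iff p _ _ (by decide)]; exact h3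
      have c4 : (p == "chunkhound/providers".toList || PySem.Chars.startswith p "chunkhound/providers/".toList) = false := by
        rw [← Bool.not_eq_true, pvCond_iff p _ _ (by decide)]; exact h4
      have c5 : (p == "chunkhound/services/research".toList || PySem.Chars.startswith p "chunkhound/services/research/".toList) = false := by
        rw [← Bool.not_eq_true, pvCond_iff p _ _ (by decide)]; exact h5
      have c6 : (p == "chunkhound/services".toList || PySem.Chars.startswith p "chunkhound/services/".toList) = false := by
        rw [← Bool.not_eq_true, pvCond_iff p _ _ (by decide)]; exact h6
      have c7 : (p == "chunkhound/core".toList || PySem.Chars.startswith p "chunkhound/core/".toList) = false := by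
        rw [← Bool.not_eq_true, pvCond_iff p _ _ (by decide)]; exact h7
      have c8 : (p == "tests".toList || PySem.Chars.startswith p "tests/".toList) = true := by
        rw [pvCond_iff p _ _ (by decide)]; exact h8
      simp only [pvScanA, pvPrefixesA, c1, c2, c3, c4, c5, c6, c7, c8, Bool.false_eq_true, if_false, if_true]
      refine (pvKey p "tests".toList (by decide) h8 ?_).symm
      · intro b' hb' hpref
        exact absurd hpref (by
          have : ∀ x ∈ pvList10, ¬ (("tests".toList ++ ['/']) <+: x) := by decide
          exact this b' hb')
    by_cases h9 : pvP p "scripts".toList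
    ·
      have c1 : (p == "chunkhound/api/cli".toList || PySem.Chars.startswith p "chunkhound/api/cli/".toList) = false := by
        rw [← Bool.not_eq_true, pvCond_iff p _ _ (by decide)]; exact h1
      have c2 : (p == "chunkhound/snapshot".toList || PySem.Chars.startswith p "chunkhound/snapshot/".toList) = false := by
        rw [← Bool.not_eq_true, pvCond_iff p _ _ (by decide)]; exact h2
      have c3 : (p == "chunkhound/parsers".toList || PySem.Chars.startswith p "chunkhound/parsers/".toList) = false := by
        rw [← Bool.not_eq_true, pvCond_iff p _ _ (by decide)]; exact h3
      have c4 : (p == "chunkhound/providers".toList || PySem.Chars.startswith p "chunkhound/providers/".toList) = false := by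
        rw [← Bool.not_eq_true, pvCond_iff p _ _ (by decide)]; exact h4
      have c5 : (p == "chunkhound/services/research".toList || PySem.Chars.startswith p "chunkhound/services/research/".toList) = false := by
        rw [← Bool.not_eq_true, pvCond_iff p _ _ (by decide)]; exact h5
      have c6 : (p == "chunkhound/services".toList || PySem.Chars.startswith p "chunkhound/services/".toList) = false := by
        rw [← Bool.not_eq_true, pvCond_iff p _ _ (by decide)]; exact h6
      have c7 : (p == "chunkhound/core".toList || PySem.Chars.startswith p "chunkhound/core/".toList) = false := by
        rw [← Bool.not_eq_true, pvCond_iff p _ _ (by decide)]; exact h7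
      have c8 : (p == "tests".toList || PySem.Chars.startswith p "tests/".toList) = false := by
        rw [← Bool.not_eq_true, pvCond_iff p _ _ (by decide)]; exact h8
      have c9 : (p == "scripts".toList || PySem.Chars.startswith p "scripts/".toList) = true := by
        rw [pvCond_iff p _ _ (by decide)]; exact h9
      simp only [pvScanA, pvPrefixesA, c1, c2, c3, c4, c5, c6, c7, c8, c9, Bool.false_eq_true, if_false, if_true]
      refine (pvKey p "scripts".toList (by decide) h9 ?_).symm
      · intro b' hb' hpref
        exact absurd hpref (by
          have : ∀ x ∈ pvList10, ¬ (("scripts".toList ++ ['/']) <+: x) := by decide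
          exact this b' hb')
    by_cases h10 : pvP p "operations".toList
    ·
      have c1 : (p == "chunkhound/api/cli".toList || PySem.Chars.startswith p "chunkhound/api/cli/".toList) = false := by
        rw [← Bool.not_eq_true, pvCond_iff p _ _ (by decide)]; exact h1
      have c2 : (p == "chunkhound/snapshot".toList || PySem.Chars.startswith p "chunkhound/snapshot/".toList) = false := by
        rw [← Bool.not_eq_true, pvCond_iff p _ _ (by decide)]; exact h2
      have c3 : (p == "chunkhound/parsers".toList || PySem.Chars.startswith p "chunkhound/parsers/".toList) = false := by
        rw [← Bool.not_eq_true, pvCond_iff p _ _ (by decide)]; exact h3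
      have c4 : (p == "chunkhound/providers".toList || PySem.Chars.startswith p "chunkhound/providers/".toList) = false := by
        rw [← Bool.not_eq_true, pvCond_iff p _ _ (by decide)]; exact h4
      have c5 : (p == "chunkhound/services/research".toList || PySem.Chars.startswith p "chunkhound/services/research/".toList) = false := by
        rw [← Bool.not_eq_true, pvCond_iff p _ _ (by decide)]; exact h5
      have c6 : (p == "chunkhound/services".toList || PySem.Chars.startswith p "chunkhound/services/".toList) = false := by
        rw [← Bool.not_eq_true, pvCond_iff p _ _ (by decide)]; exact h6
      have c7 : (p == "chunkhound/core".toList || PySem.Chars.startswith p "chunkhound/core/".toList) = false := by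
        rw [← Bool.not_eq_true, pvCond_iff p _ _ (by decide)]; exact h7
      have c8 : (p == "tests".toList || PySem.Chars.startswith p "tests/".toList) = false := by
        rw [← Bool.not_eq_true, pvCond_iff p _ _ (by decide)]; exact h8
      have c9 : (p == "scripts".toList || PySem.Chars.startswith p "scripts/".toList) = false := by
        rw [← Bool.not_eq_true, pvCond_iff p _ _ (by decide)]; exact h9
      have c10 : (p == "operations".toList || PySem.Chars.startswith p "operations/".toList) = true := by
        rw [pvCond_iff p _ _ (by decide)]; exact h10
      simp only [pvScanA, pvPrefixesA, c1, c2, c3, c4, c5, c6, c7, c8, c9, c10, Bool.false_eq_true, if_false, if_true]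
      refine (pvKey p "operations".toList (by decide) h10 ?_).symm
      · intro b' hb' hpref
        exact absurd hpref (by
          have : ∀ x ∈ pvList10, ¬ (("operations".toList ++ ['/']) <+: x) := by decide
          exact this b' hb')
    ·
      have c1 : (p == "chunkhound/api/cli".toList || PySem.Chars.startswith p "chunkhound/api/cli/".toList) = false := by
        rw [← Bool.not_eq_true, pvCond_iff p _ _ (by decide)]; exact h1
      have c2 : (p == "chunkhound/snapshot".toList || PySem.Chars.startswith p "chunkhound/snapshot/".toList) = false := by
        rw [← Bool.not_eq_true, pvCond_iff p _ _ (by decide)]; exact h2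
      have c3 : (p == "chunkhound/parsers".toList || PySem.Chars.startswith p "chunkhound/parsers/".toList) = false := by
        rw [← Bool.not_eq_true, pvCond_iff p _ _ (by decide)]; exact h3
      have c4 : (p == "chunkhound/providers".toList || PySem.Chars.startswith p "chunkhound/providers/".toList) = false := by
        rw [← Bool.not_eq_true, pvCond_iff p _ _ (by decide)]; exact h4
      have c5 : (p == "chunkhound/services/research".toList || PySem.Chars.startswith p "chunkhound/services/research/".toList) = false := by
        rw [← Bool.not_eq_true, pvCond_iff p _ _ (by decide)]; exact h5
      have c6 : (p == "chunkhound/services".toList || PySem.Chars.startswith p "chunkhound/services/".toList) = false := by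
        rw [← Bool.not_eq_true, pvCond_iff p _ _ (by decide)]; exact h6
      have c7 : (p == "chunkhound/core".toList || PySem.Chars.startswith p "chunkhound/core/".toList) = false := by
        rw [← Bool.not_eq_true, pvCond_iff p _ _ (by decide)]; exact h7
      have c8 : (p == "tests".toList || PySem.Chars.startswith p "tests/".toList) = false := by
        rw [← Bool.not_eq_true, pvCond_iff p _ _ (by decide)]; exact h8
      have c9 : (p == "scripts".toList || PySem.Chars.startswith p "scripts/".toList) = false := by
        rw [← Bool.not_eq_true, pvCond_iff p _ _ (by decide)]; exact h9
      have c10 : (p == "operations".toList || PySem.Chars.startswith p "operations/".toList) = false := by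
        rw [← Bool.not_eq_true, pvCond_iff p _ _ (by decide)]; exact h10
      simp only [pvScanA, pvPrefixesA, c1, c2, c3, c4, c5, c6, c7, c8, c9, c10, Bool.false_eq_true, if_false]
      refine (pvKeyNone p ?_).symm
      intro b hb
      simp only [pvList10, List.mem_cons, List.not_mem_nil, or_false] at hb
      rcases hb with rfl|rfl|rfl|rfl|rfl|rfl|rfl|rfl|rfl|rfl
      · exact h1
      · exact h2
      · exact h3
      · exact h4
      · exact h5
      · exact h6
      · exact h7
      · exact h8
      · exact h9
      · exact h10
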